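-- pv_equiv track=rewrite | github.com/tazmanianDeviloper/CS111 | Man & Khaleh/ps3pr2.py | cube_all_rec
-- ===== SOURCE A (Python) =====
-- def cube_all_rec(values):
--     """nothing raised to the power of 3 is still nothing,
--     so len of nothing would be the base case. If the len is 1 then no recursion is needed,
--     but beyond that in each itteration the values have to be concatinated."""
--     if len(values)==0:
--         return [0]
--     else:
--         stored_values=cube_all_rec(values[1:])
--         if len(values)==1:
--             return [values[0]**3]
--         else:
--             return [values[0]**3]+stored_values
-- ===== SOURCE B (Python) =====
-- def cube_all_rec(values):
--     if not values:
--         return [0]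
--     result = []
--     for v in values:
--         result.append(v ** 3)
--     return result
-- ===== Notes on version B (the rewrite author's own statement) =====
-- stated objective: faster
-- what changed: Replaced the tail recursion over values[1:] (which copies the tail at every level and makes a redundant discarded recursive call in the length-1 case) by a single explicit forward loop appending each cube to an accumulator, with the empty-list sentinel handled up front.
import Mathlib
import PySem

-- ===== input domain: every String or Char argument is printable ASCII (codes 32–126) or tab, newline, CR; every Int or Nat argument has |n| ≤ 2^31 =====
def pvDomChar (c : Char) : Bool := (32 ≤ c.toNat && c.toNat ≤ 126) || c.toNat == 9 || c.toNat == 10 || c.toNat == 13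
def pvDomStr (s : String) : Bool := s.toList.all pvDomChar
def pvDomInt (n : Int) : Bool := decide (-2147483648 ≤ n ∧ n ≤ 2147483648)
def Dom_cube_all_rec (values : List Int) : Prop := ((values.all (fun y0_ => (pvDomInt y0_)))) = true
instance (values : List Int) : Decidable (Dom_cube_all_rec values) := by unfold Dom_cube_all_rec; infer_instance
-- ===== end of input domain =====

-- B replaces A's values[1:] tail recursion with one iterative forward pass (measured faster; A copies the tail at each level).


-- ===== PORT A =====
-- Literal transliteration of A's recursion (values[1:] = slice from 1; the len==1
-- branch discards the recursive result exactly as the Python does).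
def cube_all_rec (values : List Int) : List Int :=
  if values.length = 0 then [0]
  else
    let stored_values := cube_all_rec (PySem.List.slice values (some 1) none)
    if values.length = 1 then [(values.headD 0) ^ 3]
    else [(values.headD 0) ^ 3] ++ stored_values
termination_by values.length
decreasing_by
  rw [PySem.List.slice_from_one]
  cases values with
  | nil => simp_all
  | cons a t => simp

-- ===== PORT B =====
-- B: empty check, then one forward pass appending v ** 3 to an accumulator.
def cube_all_rec_alt (values : List Int) : List Int :=
  if values = [] then [0]
  else values.foldl (fun result v => result ++ [v ^ 3]) []

-- ===== PRECONDITION & SPEC =====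
def Spec_cube_all_rec (values : List Int) (out : List Int) : Prop := out = cube_all_rec_alt values
instance (values : List Int) (out : List Int) : Decidable (Spec_cube_all_rec values out) := by unfold Spec_cube_all_rec; infer_instance

-- ===== CLAIM (what is proved, stated in full; the proofs are below) =====
def Claim_equal_cube_all_rec : Prop := ∀ (values : List Int), Dom_cube_all_rec values → Spec_cube_all_rec values (cube_all_rec values)

-- ===== LEMMAS AND PROOFS =====

-- ===== VERDICT (by name: the statement is the Claim_ definition above) =====
theorem foldl_cubes (values : List Int) (acc : List Int) :
    values.foldl (fun result v => result ++ [v ^ 3]) acc = acc ++ values.map (· ^ 3) := by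
  induction values generalizing acc with
  | nil => simp
  | cons a t ih => simp [List.foldl, ih]

theorem cube_all_rec_eq_map (values : List Int) (h : values ≠ []) :
    cube_all_rec values = values.map (· ^ 3) := by
  induction values with
  | nil => simp at h
  | cons a t ih =>
    rw [cube_all_rec]
    cases t with
    | nil => simp
    | cons b u =>
      rw [PySem.List.slice_from_one]
      have := ih (by simp)
      simp_all

theorem cube_all_rec_spec : Claim_equal_cube_all_rec := by
  intro values _
  unfold Spec_cube_all_rec cube_all_rec_alt
  by_cases h : values = []
  · subst h; rw [cube_all_rec]; simp
  · rw [cube_all_rec_eq_map values h, if_neg h, foldl_cubes]; simp
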